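-- pv_equiv track=rewrite | github.com/lucilleliull/blog | scripts/import_notion_folder.py | cleanup_body
-- ===== SOURCE A (Python) =====
-- def cleanup_body(lines: list[str]):
--     out=[]
--     for i,line in enumerate(lines):
--         # strip Notion metadata lines
--         if line.startswith("Created:"):
--             continue
--         out.append(line)
--     # drop leading blank lines
--     while out and out[0].strip()=="":
--         out.pop(0)
--     return out
-- ===== SOURCE B (Python) =====
-- def cleanup_body(lines: list[str]):
--     # Single pass: skip metadata lines; skip blanks only until first kept line.
--     out = []
--     started = False
--     for line in lines:
--         if line.startswith("Created:"):
--             continue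
--         if not started and line.strip() == "":
--             continue
--         started = True
--         out.append(line)
--     return out
-- ===== Notes on version B (the rewrite author's own statement) =====
-- stated objective: alternative
-- what changed: Replaces the two-phase algorithm (build filtered list, then repeatedly pop leading blanks) with a single stateful pass that skips blanks only until the first kept line.
import Mathlib
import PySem

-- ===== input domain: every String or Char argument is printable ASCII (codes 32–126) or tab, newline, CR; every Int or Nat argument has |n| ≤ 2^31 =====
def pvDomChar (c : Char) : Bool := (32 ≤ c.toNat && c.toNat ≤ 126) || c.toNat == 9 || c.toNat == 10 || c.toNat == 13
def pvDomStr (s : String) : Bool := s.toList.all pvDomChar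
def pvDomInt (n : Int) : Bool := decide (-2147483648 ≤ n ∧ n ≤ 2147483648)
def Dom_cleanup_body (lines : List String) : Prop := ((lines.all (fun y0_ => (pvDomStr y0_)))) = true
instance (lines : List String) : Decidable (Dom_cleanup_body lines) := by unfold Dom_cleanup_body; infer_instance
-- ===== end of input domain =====

-- B replaces A's two phases (filter pass, then pop(0)-loop on leading blanks) by one
-- stateful pass with a `started` flag; alternative decomposition, same results.

-- ===== PORT A =====
-- the trailing `while out and out[0].strip()=="": out.pop(0)` loop
def cleanupA_drop : List String → List String
  | [] => []
  | x :: xs => if PySem.Str.strip x = "" then cleanupA_drop xs else x :: xs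

def cleanup_body (lines : List String) : List String :=
  cleanupA_drop
    (lines.foldl (fun out line =>
      if PySem.Str.startswith line "Created:" then out else out ++ [line]) [])

-- ===== PORT B =====
-- the single loop of Source B, carrying the `started` flag (out is built by recursion)
def cleanupB_loop : Bool → List String → List String
  | _, [] => []
  | started, line :: rest =>
    if PySem.Str.startswith line "Created:" then cleanupB_loop started rest
    else if !started && PySem.Str.strip line = "" then cleanupB_loop started rest
    else line :: cleanupB_loop true rest

def cleanup_body_alt (lines : List String) : List String :=
  cleanupB_loop false lines

-- ===== PRECONDITION & SPEC =====
def Spec_cleanup_body (lines : List String) (out : List String) : Prop := out = cleanup_body_alt lines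
instance (lines : List String) (out : List String) : Decidable (Spec_cleanup_body lines out) := by unfold Spec_cleanup_body; infer_instance

-- ===== CLAIM (what is proved, stated in full; the proofs are below) =====
def Claim_equal_cleanup_body : Prop := ∀ (lines : List String), Dom_cleanup_body lines → Spec_cleanup_body lines (cleanup_body lines)

-- ===== LEMMAS AND PROOFS =====

theorem cleanupA_foldl_eq_filter (lines acc : List String) :
    lines.foldl (fun out line =>
      if PySem.Str.startswith line "Created:" then out else out ++ [line]) acc
    = acc ++ lines.filter (fun l => !PySem.Str.startswith l "Created:") := by
  have h : (fun (out : List String) (line : String) =>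
      if PySem.Str.startswith line "Created:" then out else out ++ [line])
      = fun out line => if (!PySem.Str.startswith line "Created:") = true
          then out ++ [line] else out := by
    funext out line
    cases hp : PySem.Str.startswith line "Created:" <;> simp
  rw [h, PySem.List.foldl_append_if_eq_filter]

theorem cleanupB_started (xs : List String) :
    cleanupB_loop true xs = xs.filter (fun l => !PySem.Str.startswith l "Created:") := by
  induction xs with
  | nil => rfl
  | cons l xs ih =>
    cases hp : PySem.Str.startswith l "Created:" <;>
      simp only [cleanupB_loop, List.filter_cons, hp, Bool.not_true, Bool.not_false,
        if_true, if_false, Bool.false_eq_true, Bool.false_and, ih]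

theorem cleanupB_eq_drop_filter (xs : List String) :
    cleanupB_loop false xs
      = cleanupA_drop (xs.filter (fun l => !PySem.Str.startswith l "Created:")) := by
  induction xs with
  | nil => rfl
  | cons l xs ih =>
    cases hp : PySem.Str.startswith l "Created:"
    case false =>
      by_cases hs : PySem.Str.strip l = ""
      · simp only [cleanupB_loop, List.filter_cons, hp, Bool.not_false, if_true, if_false,
          Bool.false_eq_true, hs, Bool.true_and]
        simp [cleanupA_drop, hs, ih]
      · simp only [cleanupB_loop, List.filter_cons, hp, Bool.not_false, if_true, if_false,
          Bool.false_eq_true]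
        simp [cleanupA_drop, hs, cleanupB_started]
    case true =>
      simp only [cleanupB_loop, List.filter_cons, hp, Bool.not_true, if_true, if_false,
        Bool.false_eq_true, ih]

-- ===== VERDICT (by name: the statement is the Claim_ definition above) =====
theorem cleanup_body_spec : Claim_equal_cleanup_body := by
  intro lines _
  unfold Spec_cleanup_body cleanup_body cleanup_body_alt
  rw [cleanupA_foldl_eq_filter, cleanupB_eq_drop_filter]
  rfl
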